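-- pv_equiv track=rewrite | github.com/AnuR1234/Master_Thesis_codebase | RAG Architectures/Open-Source RAG/streamlit_app_RAG.py | clean_code_for_display
-- ===== SOURCE A (Python) =====
-- from typing import List, Dict, Any, Optional, Tuple
--
-- def clean_code_for_display(code_snippet: str) -> Optional[str]:
--     """
--     Clean code snippet for display by removing artifacts and formatting issues.
--
--     This function removes common code formatting artifacts and cleans up
--     whitespace issues while preserving the actual code structure.
--
--     Args:
--         code_snippet (str): Raw code snippet
--
--     Returns:
--         Optional[str]: Cleaned code snippet or None if invalid/too short
--     """
--     if not code_snippet: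
--         return ""
--
--     # Remove common formatting artifacts
--     cleaned = code_snippet.replace("##END OF CODE SNIPLET##", "")
--     cleaned = cleaned.replace("##END OF CODE SNIPPET##", "")
--     cleaned = cleaned.replace("#END OF CODE", "")
--     cleaned = cleaned.replace("cntlerror EXCEPTTIONS OTHER EXCEPTSIONS", "")
--
--     # Clean up extra whitespace and newlines
--     lines = [line.rstrip() for line in cleaned.split('\n')]
--
--     # Remove empty lines at start and end
--     while lines and not lines[0].strip():
--         lines.pop(0)
--     while lines and not lines[-1].strip():
--         lines.pop()
--
--     # Limit excessive empty lines
--     clean_lines = []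
--     empty_count = 0
--     for line in lines:
--         if not line.strip():
--             empty_count += 1
--             if empty_count <= 1:  # Allow max 1 consecutive empty line
--                 clean_lines.append(line)
--         else:
--             empty_count = 0
--             clean_lines.append(line)
--
--     result = '\n'.join(clean_lines).strip()
--
--     # Return None if the result is too short or meaningless
--     if len(result) < 10 or result.lower() in ['', 'none', 'n/a']:
--         return None
--
--     return result
-- ===== SOURCE B (Python) =====
-- from itertools import groupby
--
--
-- def clean_code_for_display(code_snippet):
--     if not code_snippet:
--         return ""
--
--     # Remove the fixed formatting artifacts
--     for junk in ("##END OF CODE SNIPLET##", "##END OF CODE SNIPPET##",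
--                  "#END OF CODE", "cntlerror EXCEPTTIONS OTHER EXCEPTSIONS"):
--         code_snippet = code_snippet.replace(junk, "")
--
--     # rstrip each line, then collapse every run of blank lines to a single
--     # blank line in one pass; the final .strip() removes edge whitespace, so
--     # no separate leading/trailing-blank-line trimming is needed.
--     lines = (line.rstrip() for line in code_snippet.split('\n'))
--     pieces = []
--     for blank, group in groupby(lines, key=lambda l: not l):
--         if blank:
--             pieces.append('')
--         else:
--             pieces.extend(group)
--
--     result = '\n'.join(pieces).strip()
--     # anything shorter than 10 chars (this covers '', 'none', 'n/a') is meaningless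
--     return result if len(result) >= 10 else None
-- ===== Notes on version B (the rewrite author's own statement) =====
-- stated objective: simpler
-- what changed: Replaces the two edge-trimming while loops and the empty_count counter loop by a single itertools.groupby pass that emits one blank line per blank run (the final strip() makes edge trimming redundant), folds the four replace calls over a tuple, and drops the lower()-in-list guard that len(result)<10 already subsumes.
import Mathlib
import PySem

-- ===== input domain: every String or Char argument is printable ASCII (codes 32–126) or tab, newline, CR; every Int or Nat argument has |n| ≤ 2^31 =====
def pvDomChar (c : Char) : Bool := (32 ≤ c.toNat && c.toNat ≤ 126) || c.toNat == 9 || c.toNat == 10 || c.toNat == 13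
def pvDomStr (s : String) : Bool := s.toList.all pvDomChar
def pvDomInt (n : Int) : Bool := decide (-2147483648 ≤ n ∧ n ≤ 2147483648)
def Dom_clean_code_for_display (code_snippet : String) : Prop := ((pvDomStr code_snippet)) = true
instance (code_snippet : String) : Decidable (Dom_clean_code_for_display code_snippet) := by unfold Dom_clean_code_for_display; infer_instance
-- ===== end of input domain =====

-- B is simpler: one groupby-style pass collapses blank-line runs (the final strip() makes the
-- edge-trim loops redundant) and the len<10 test subsumes the lower()-in-list guard.

-- ===== PORT A =====
-- while lines and not lines[0].strip(): lines.pop(0)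
def pvTrimFrontA : List (List Char) → List (List Char)
  | [] => []
  | l :: rest => if PySem.Chars.strip l = [] then pvTrimFrontA rest else l :: rest

-- while lines and not lines[-1].strip(): lines.pop()  — the same loop run from the back
def pvTrimBackA (lines : List (List Char)) : List (List Char) :=
  (pvTrimFrontA lines.reverse).reverse

-- one step of the empty_count loop; state = (clean_lines, empty_count)
def pvStepA (st : List (List Char) × Int) (line : List Char) : List (List Char) × Int :=
  if PySem.Chars.strip line = [] then
    if st.2 + 1 ≤ 1 then (st.1 ++ [line], st.2 + 1) else (st.1, st.2 + 1)
  else (st.1 ++ [line], 0)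

def pvCollapseA (lines : List (List Char)) : List (List Char) :=
  (lines.foldl pvStepA ([], 0)).1

def clean_code_for_display (code_snippet : String) : Option String :=
  if code_snippet = "" then some "" else
  let cleaned := PySem.Str.replace code_snippet "##END OF CODE SNIPLET##" ""
  let cleaned := PySem.Str.replace cleaned "##END OF CODE SNIPPET##" ""
  let cleaned := PySem.Str.replace cleaned "#END OF CODE" ""
  let cleaned := PySem.Str.replace cleaned "cntlerror EXCEPTTIONS OTHER EXCEPTSIONS" ""
  let lines := (PySem.Chars.splitOn cleaned.toList ['\n']).map PySem.Chars.rstrip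
  let lines := pvTrimFrontA lines
  let lines := pvTrimBackA lines
  let clean_lines := pvCollapseA lines
  let result := PySem.Chars.strip (PySem.Chars.join ['\n'] clean_lines)
  if (result.length : Int) < 10 ∨
      PySem.Chars.lower result ∈ [([] : List Char), ['n','o','n','e'], ['n','/','a']] then none
  else some (String.ofList result)

-- ===== PORT B =====
-- itertools.groupby(lines, key): the list of (key-value, run) pairs
def pvRuns (key : List Char → Bool) : List (List Char) → List (Bool × List (List Char))
  | [] => []
  | l :: rest =>
    (key l, l :: rest.takeWhile (fun x => key x == key l))
      :: pvRuns key (rest.dropWhile (fun x => key x == key l))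
termination_by ls => ls.length
decreasing_by
  simpa using Nat.lt_succ_of_le (List.length_dropWhile_le _ _)

def clean_code_for_display_alt (code_snippet : String) : Option String :=
  if code_snippet = "" then some "" else
  let cleaned := ["##END OF CODE SNIPLET##", "##END OF CODE SNIPPET##", "#END OF CODE",
      "cntlerror EXCEPTTIONS OTHER EXCEPTSIONS"].foldl
      (fun s junk => PySem.Str.replace s junk "") code_snippet
  let lines := (PySem.Chars.splitOn cleaned.toList ['\n']).map PySem.Chars.rstrip
  -- for blank, group in groupby(lines, key=lambda l: not l): append '' / extend group
  let pieces := (pvRuns (fun l => l == []) lines).foldl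
      (fun acc g => if g.1 then acc ++ [([] : List Char)] else acc ++ g.2) []
  let result := PySem.Chars.strip (PySem.Chars.join ['\n'] pieces)
  if 10 ≤ (result.length : Int) then some (String.ofList result) else none

-- ===== PRECONDITION & SPEC =====
def Spec_clean_code_for_display (code_snippet : String) (out : Option String) : Prop := out = clean_code_for_display_alt code_snippet
instance (code_snippet : String) (out : Option String) : Decidable (Spec_clean_code_for_display code_snippet out) := by unfold Spec_clean_code_for_display; infer_instance

-- ===== CLAIM (what is proved, stated in full; the proofs are below) =====
def Claim_equal_clean_code_for_display : Prop := ∀ (code_snippet : String), Dom_clean_code_for_display code_snippet → Spec_clean_code_for_display code_snippet (clean_code_for_display code_snippet)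

-- ===== LEMMAS AND PROOFS =====

theorem pv_rstrip_eq_nil_iff (cs : List Char) :
    PySem.Chars.rstrip cs = [] ↔ ∀ c ∈ cs, PySem.Chars.isspace c := by
  simp [PySem.Chars.rstrip, List.dropWhile_eq_nil_iff]

theorem pv_strip_rstrip_eq_nil_iff (cs : List Char) :
    PySem.Chars.strip (PySem.Chars.rstrip cs) = [] ↔ PySem.Chars.rstrip cs = [] := by
  constructor
  · intro h
    set x := PySem.Chars.rstrip cs with hx
    have hall : ∀ c ∈ x, PySem.Chars.isspace c := by
      have h2 : ∀ c ∈ PySem.Chars.lstrip x, PySem.Chars.isspace c :=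
        fun c hc => by
          have := (pv_rstrip_eq_nil_iff (PySem.Chars.lstrip x)).1 h
          exact this c hc
      intro c hc
      rcases List.mem_append.1 ((List.takeWhile_append_dropWhile (p := PySem.Chars.isspace) (l := x)) ▸ hc) with h3 | h3
      · exact List.mem_takeWhile_imp h3
      · exact h2 c h3
    by_contra hne
    have hxr : x.reverse ≠ [] := by simpa using hne
    have hd : List.dropWhile PySem.Chars.isspace cs.reverse ≠ [] := by
      have : x.reverse = List.dropWhile PySem.Chars.isspace cs.reverse := by
        rw [hx]; simp [PySem.Chars.rstrip]
      rwa [this] at hxr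
    have hnot := List.head_dropWhile_not (p := PySem.Chars.isspace) (l := cs.reverse) hd
    have hmem : (List.dropWhile PySem.Chars.isspace cs.reverse).head hd ∈ x := by
      have : (List.dropWhile PySem.Chars.isspace cs.reverse).head hd ∈ List.dropWhile PySem.Chars.isspace cs.reverse :=
        List.head_mem hd
      rw [hx]
      simp only [PySem.Chars.rstrip, List.mem_reverse]
      exact this
    simp [hall _ hmem] at hnot
  · intro h; rw [h]; rfl

theorem pv_strip_cons_ws (c : Char) (cs : List Char) (h : PySem.Chars.isspace c) :
    PySem.Chars.strip (c :: cs) = PySem.Chars.strip cs := by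
  simp [PySem.Chars.strip, PySem.Chars.lstrip, h]

theorem pv_rstrip_append_ws (c : Char) (cs : List Char) (h : PySem.Chars.isspace c) :
    PySem.Chars.rstrip (cs ++ [c]) = PySem.Chars.rstrip cs := by
  simp [PySem.Chars.rstrip, h]

theorem pv_strip_append_ws (c : Char) (cs : List Char) (h : PySem.Chars.isspace c) :
    PySem.Chars.strip (cs ++ [c]) = PySem.Chars.strip cs := by
  by_cases hall : ∀ x ∈ cs, PySem.Chars.isspace x
  · have h1 : PySem.Chars.lstrip (cs ++ [c]) = [] := by
      simp [PySem.Chars.lstrip, List.dropWhile_append, List.dropWhile_eq_nil_iff.2 hall, h]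
    have h2 : PySem.Chars.lstrip cs = [] := by
      simp [PySem.Chars.lstrip, List.dropWhile_eq_nil_iff.2 hall]
    simp [PySem.Chars.strip, h1, h2]
  · have hne : List.dropWhile PySem.Chars.isspace cs ≠ [] := by
      simpa [List.dropWhile_eq_nil_iff] using hall
    have h1 : PySem.Chars.lstrip (cs ++ [c]) = PySem.Chars.lstrip cs ++ [c] := by
      simp [PySem.Chars.lstrip, List.dropWhile_append, hne]
    rw [PySem.Chars.strip, PySem.Chars.strip, h1, pv_rstrip_append_ws _ _ h]

theorem pv_join_append_nil (xs : List (List Char)) (hne : xs ≠ []) :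
    PySem.Chars.join ['\n'] (xs ++ [[]]) = PySem.Chars.join ['\n'] xs ++ ['\n'] := by
  induction xs with
  | nil => simp at hne
  | cons a t ih =>
    cases t with
    | nil => simp [PySem.Chars.join_cons_cons, PySem.Chars.join_singleton]
    | cons b u =>
      have ih' := ih (by simp)
      simp only [List.cons_append] at ih' ⊢
      rw [PySem.Chars.join_cons_cons, PySem.Chars.join_cons_cons (p := a) (q := b), ih']
      simp

theorem pv_strip_join_cons_nil (xs : List (List Char)) :
    PySem.Chars.strip (PySem.Chars.join ['\n'] ([] :: xs))
      = PySem.Chars.strip (PySem.Chars.join ['\n'] xs) := by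
  cases xs with
  | nil => simp [PySem.Chars.join_singleton, PySem.Chars.join_nil]
  | cons b u =>
    rw [PySem.Chars.join_cons_cons]
    simpa using pv_strip_cons_ws '\n' _ (by decide)

theorem pv_strip_join_append_nil (xs : List (List Char)) :
    PySem.Chars.strip (PySem.Chars.join ['\n'] (xs ++ [[]]))
      = PySem.Chars.strip (PySem.Chars.join ['\n'] xs) := by
  cases xs with
  | nil => simp [PySem.Chars.join_singleton, PySem.Chars.join_nil]
  | cons b u =>
    rw [pv_join_append_nil _ (by simp), pv_strip_append_ws '\n' _ (by decide)]



def pvGC : List (List Char) → List (List Char)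
  | [] => []
  | l :: rest =>
    if l = [] then [] :: pvGC (rest.dropWhile (· == []))
    else l :: pvGC rest
termination_by ls => ls.length
decreasing_by
  · simpa using Nat.lt_succ_of_le (List.length_dropWhile_le _ _)
  · simp

def pvH (lines : List (List Char)) : Prop :=
  ∀ l ∈ lines, (PySem.Chars.strip l = [] ↔ l = [])

theorem pvH_sublist {xs ys : List (List Char)} (h : xs.Sublist ys) (H : pvH ys) : pvH xs :=
  fun l hl => H l (h.mem hl)

theorem pv_trimFront_eq (lines : List (List Char)) (H : pvH lines) :
    pvTrimFrontA lines = lines.dropWhile (· == []) := by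
  induction lines with
  | nil => rfl
  | cons l rest ih =>
    rw [pvTrimFrontA, List.dropWhile_cons]
    by_cases hl : l = []
    · simp only [hl]
      rw [if_pos ((H [] (by simp [hl])).2 rfl)]
      simpa using ih (pvH_sublist (List.sublist_cons_self _ _) H)
    · rw [if_neg (fun hs => hl ((H l (by simp)).1 hs))]
      simp [hl]

theorem pv_foldA_blankrun (rest : List (List Char)) (acc : List (List Char)) (c : Int)
    (hc : 1 ≤ c) (H : pvH rest) :
    (rest.foldl pvStepA (acc, c)).1
      = ((rest.dropWhile (· == [])).foldl pvStepA (acc, (1 : Int))).1 := by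
  induction rest generalizing c with
  | nil => rfl
  | cons l t ih =>
    by_cases hl : l = []
    · have hs : PySem.Chars.strip l = [] := (H l (by simp)).2 hl
      rw [List.foldl_cons, List.dropWhile_cons_of_pos (by simp [hl])]
      have hstep : pvStepA (acc, c) l = (acc, c + 1) := by
        simp only [pvStepA, if_pos hs]; rw [if_neg (by omega)]
      rw [hstep]
      exact ih (c + 1) (by omega) (pvH_sublist (List.sublist_cons_self _ _) H)
    · have hs : ¬ PySem.Chars.strip l = [] := fun h => hl ((H l (by simp)).1 h)
      rw [List.foldl_cons, List.dropWhile_cons_of_neg (by simp [hl]), List.foldl_cons]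
      have h1 : pvStepA (acc, c) l = (acc ++ [l], 0) := by simp [pvStepA, hs]
      have h2 : pvStepA (acc, (1:Int)) l = (acc ++ [l], 0) := by simp [pvStepA, hs]
      rw [h1, h2]

theorem pv_foldA_headNonblank (ys : List (List Char)) (acc : List (List Char)) (c : Int)
    (hh : ∀ h, ys.head? = some h → ¬ PySem.Chars.strip h = []) :
    (ys.foldl pvStepA (acc, c)).1 = (ys.foldl pvStepA (acc, (0 : Int))).1 := by
  cases ys with
  | nil => rfl
  | cons y t =>
    have hs := hh y rfl
    have h1 : pvStepA (acc, c) y = (acc ++ [y], 0) := by simp [pvStepA, hs]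
    have h2 : pvStepA (acc, (0:Int)) y = (acc ++ [y], 0) := by simp [pvStepA, hs]
    rw [List.foldl_cons, List.foldl_cons, h1, h2]

theorem pv_foldA_eq_pvGC (lines : List (List Char)) (acc : List (List Char)) (H : pvH lines) :
    (lines.foldl pvStepA (acc, 0)).1 = acc ++ pvGC lines := by
  match lines with
  | [] => simp [pvGC]
  | l :: rest =>
    by_cases hl : l = []
    · have hs : PySem.Chars.strip l = [] := (H l (by simp)).2 hl
      have h1 : pvStepA (acc, 0) l = (acc ++ [l], 1) := by simp [pvStepA, hs]
      have Ht : pvH rest := pvH_sublist (List.sublist_cons_self _ _) H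
      have Hd : pvH (rest.dropWhile (· == [])) := pvH_sublist (List.dropWhile_sublist _) Ht
      rw [List.foldl_cons, h1, pv_foldA_blankrun rest (acc ++ [l]) 1 le_rfl Ht,
        pv_foldA_headNonblank _ _ 1 ?hh,
        pv_foldA_eq_pvGC (rest.dropWhile (· == [])) (acc ++ [l]) Hd,
        pvGC, if_pos hl]
      · simp [hl]
      case hh =>
        intro h hh
        have hd : rest.dropWhile (· == []) ≠ [] := by intro h0; rw [h0] at hh; simp at hh
        have hp : (h == ([] : List Char)) = false := by
          have h2 := List.head_dropWhile_not (p := (· == [])) (l := rest) hd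
          rwa [List.head_eq_iff_head?_eq_some hd |>.2 hh] at h2
        have hne : h ≠ [] := by simpa using hp
        have hmem : h ∈ l :: rest :=
          List.mem_cons_of_mem _ ((List.dropWhile_sublist _).mem (List.mem_of_mem_head? hh))
        exact fun hstrip => hne ((H h hmem).1 hstrip)
    · have hs : ¬ PySem.Chars.strip l = [] := fun h => hl ((H l (by simp)).1 h)
      have h1 : pvStepA (acc, 0) l = (acc ++ [l], 0) := by simp [pvStepA, hs]
      rw [List.foldl_cons, h1,
        pv_foldA_eq_pvGC rest (acc ++ [l]) (pvH_sublist (List.sublist_cons_self _ _) H),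
        pvGC, if_neg hl]
      simp
termination_by lines.length
decreasing_by
  · simpa using Nat.lt_succ_of_le (List.length_dropWhile_le _ _)
  · simp
-- pvGC front: peel the leading blank run
theorem pvGC_dropFront (lines : List (List Char)) :
    pvGC lines = (if lines.head? = some [] then [[]] else [])
      ++ pvGC (lines.dropWhile (· == [])) := by
  cases lines with
  | nil => simp [pvGC]
  | cons l rest =>
    by_cases hl : l = []
    · subst hl
      rw [pvGC, if_pos rfl, List.dropWhile_cons_of_pos (by simp)]
      simp
    · rw [List.dropWhile_cons_of_neg (by simp [hl])]
      simp [hl]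

theorem pvGC_replicate_nil (m : Nat) :
    pvGC (List.replicate (m + 1) ([] : List Char)) = [[]] := by
  rw [List.replicate_succ, pvGC, if_pos rfl]
  have hdrop : (List.replicate m ([] : List Char)).dropWhile (· == []) = [] := by
    rw [List.dropWhile_eq_nil_iff]
    intro x hx'
    simp [List.eq_of_mem_replicate hx']
  rw [hdrop, pvGC]

-- pvGC back: a trailing blank run contributes exactly one blank line
theorem pvGC_appendBlanks (xs : List (List Char)) (k : Nat)
    (hx : ∀ h : xs ≠ [], ¬ xs.getLast h = []) :
    pvGC (xs ++ List.replicate k []) = pvGC xs ++ (if k = 0 then [] else [[]]) := by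
  match xs with
  | [] =>
    cases k with
    | zero => simp [pvGC]
    | succ m =>
      rw [List.nil_append, pvGC_replicate_nil m]
      simp [pvGC]
  | l :: rest =>
    by_cases hl : l = []
    · -- rest ≠ [] and rest's last is nonblank
      have hrne : rest ≠ [] := by
        intro h0
        subst h0
        exact hx (by simp) (by simpa using hl)
      have hrlast : ¬ rest.getLast hrne = [] := by
        have := hx (by simp)
        rwa [List.getLast_cons hrne] at this
      subst hl
      have hne : rest.dropWhile (· == ([] : List Char)) ≠ [] := by
        rw [Ne, List.dropWhile_eq_nil_iff]
        intro hall
        exact hrlast (by simpa using hall _ (List.getLast_mem hrne))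
      rw [List.cons_append, pvGC, if_pos rfl, pvGC, if_pos rfl]
      have hdw : (rest ++ List.replicate k ([] : List Char)).dropWhile (· == [])
          = rest.dropWhile (· == []) ++ List.replicate k [] := by
        rw [List.dropWhile_append, if_neg (by simpa [List.isEmpty_iff] using hne)]
      rw [hdw, pvGC_appendBlanks (rest.dropWhile (· == [])) k ?hlast]
      · simp
      case hlast =>
        intro hne' h0
        have h1 : (rest.dropWhile (· == ([] : List Char))).getLast? = some [] :=
          (List.getLast_eq_iff_getLast?_eq_some hne').1 h0
        have h2 : rest.getLast? = some [] := by
          conv_lhs => rw [← List.takeWhile_append_dropWhile (p := (· == ([] : List Char))) (l := rest)]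
          rw [List.getLast?_append, h1]
          rfl
        exact hrlast ((List.getLast_eq_iff_getLast?_eq_some hrne).2 h2)
    · rw [List.cons_append, pvGC, if_neg hl, pvGC, if_neg hl,
        pvGC_appendBlanks rest k ?hr]
      · simp
      case hr =>
        intro hne
        have := hx (by simp)
        rwa [List.getLast_cons hne] at this
termination_by xs.length
decreasing_by
  · simpa using Nat.lt_succ_of_le (List.length_dropWhile_le _ _)
  · simp

-- pvGC passes a nonblank prefix through unchanged
theorem pvGC_takeDrop (ys : List (List Char)) :
    pvGC ys = ys.takeWhile (fun x => !(x == [])) ++ pvGC (ys.dropWhile (fun x => !(x == []))) := by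
  induction ys with
  | nil => simp [pvGC]
  | cons y t ih =>
    by_cases hy : y = []
    · subst hy
      rw [List.takeWhile_cons_of_neg (by simp), List.dropWhile_cons_of_neg (by simp)]
      simp
    · rw [pvGC, if_neg hy, List.takeWhile_cons_of_pos (by simp [hy]),
        List.dropWhile_cons_of_pos (by simp [hy]), ih]
      simp

-- the groupby consumer loop computes pvGC
theorem pv_foldB_eq_pvGC (lines : List (List Char)) (acc : List (List Char)) :
    ((pvRuns (fun l => l == []) lines).foldl
        (fun acc g => if g.1 then acc ++ [([] : List Char)] else acc ++ g.2) acc)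
      = acc ++ pvGC lines := by
  match lines with
  | [] => simp [pvRuns, pvGC]
  | l :: rest =>
    by_cases hl : l = []
    · subst hl
      rw [pvRuns]
      have hkey : (fun x => (x == ([] : List Char)) == true) = (fun x : List Char => x == []) := by
        funext x; simp
      rw [List.foldl_cons]
      simp only [beq_self_eq_true, if_pos]
      rw [hkey, pv_foldB_eq_pvGC (rest.dropWhile (fun x => x == [])) (acc ++ [[]]),
        pvGC, if_pos rfl]
      simp
    · rw [pvRuns, List.foldl_cons]
      have hkl : (l == ([] : List Char)) = false := by simpa using hl
      have hkey : (fun x => (x == ([] : List Char)) == false) = (fun x : List Char => !(x == [])) := by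
        funext x; simp
      simp only [hkl, if_neg, Bool.false_eq_true, not_false_eq_true]
      rw [hkey, pv_foldB_eq_pvGC (rest.dropWhile (fun x => !(x == []))) _, pvGC, if_neg hl,
        pvGC_takeDrop rest]
      simp
termination_by lines.length
decreasing_by
  · simpa using Nat.lt_succ_of_le (List.length_dropWhile_le _ _)
  · simpa using Nat.lt_succ_of_le (List.length_dropWhile_le _ _)
theorem pvH_map_rstrip (parts : List (List Char)) : pvH (parts.map PySem.Chars.rstrip) := by
  intro l hl
  obtain ⟨cs, _, rfl⟩ := List.mem_map.1 hl
  exact pv_strip_rstrip_eq_nil_iff cs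

theorem pvH_reverse {xs : List (List Char)} (H : pvH xs) : pvH xs.reverse :=
  fun l hl => H l (List.mem_reverse.1 hl)

-- the guard: the lower()-membership test is subsumed by len < 10
theorem pv_guard (r : List Char) :
    (if (r.length : Int) < 10 ∨
        PySem.Chars.lower r ∈ [([] : List Char), ['n','o','n','e'], ['n','/','a']] then
      (none : Option String)
    else some (String.ofList r))
    = (if 10 ≤ (r.length : Int) then some (String.ofList r) else none) := by
  by_cases hlen : (r.length : Int) < 10
  · rw [if_pos (Or.inl hlen), if_neg (by omega)]
  · have hmem : PySem.Chars.lower r ∉ [([] : List Char), ['n','o','n','e'], ['n','/','a']] := by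
      intro hm
      have hlr : (PySem.Chars.lower r).length = r.length := by
        simp [PySem.Chars.lower]
      have hm' : PySem.Chars.lower r = [] ∨ PySem.Chars.lower r = ['n','o','n','e'] ∨
          PySem.Chars.lower r = ['n','/','a'] := by simpa using hm
      have : r.length ≤ 4 := by
        rcases hm' with hm' | hm' | hm' <;> rw [← hlr, hm'] <;> simp
      omega
    rw [if_neg (by tauto), if_pos (by omega)]

-- both collapse pipelines produce the same final string
theorem pv_main (lines : List (List Char)) (H : pvH lines) :
    PySem.Chars.strip (PySem.Chars.join ['\n'] (pvCollapseA (pvTrimBackA (pvTrimFrontA lines))))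
      = PySem.Chars.strip (PySem.Chars.join ['\n']
          ((pvRuns (fun l => l == []) lines).foldl
            (fun acc g => if g.1 then acc ++ [([] : List Char)] else acc ++ g.2) [])) := by
  -- name the intermediate lists
  have Ht1 : pvH (lines.dropWhile (· == [])) := pvH_sublist (List.dropWhile_sublist _) H
  set t1 := lines.dropWhile (· == ([] : List Char)) with ht1
  have h1 : pvTrimFrontA lines = t1 := pv_trimFront_eq lines H
  set core := (t1.reverse.dropWhile (· == ([] : List Char))).reverse with hcore
  have Hcore : pvH core :=
    pvH_reverse (pvH_sublist (List.dropWhile_sublist _) (pvH_reverse Ht1))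
  have h2 : pvTrimBackA t1 = core := by
    rw [pvTrimBackA, pv_trimFront_eq t1.reverse (pvH_reverse Ht1)]
  -- A's collapse is pvGC on core
  have h3 : pvCollapseA core = pvGC core := by
    rw [pvCollapseA, pv_foldA_eq_pvGC core [] Hcore, List.nil_append]
  -- B's fold is pvGC on lines
  have h4 : ((pvRuns (fun l => l == []) lines).foldl
      (fun acc g => if g.1 then acc ++ [([] : List Char)] else acc ++ g.2) []) = pvGC lines := by
    rw [pv_foldB_eq_pvGC lines [], List.nil_append]
  rw [h1, h2, h3, h4]
  -- decompose t1 = core ++ replicate k []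
  set k := (t1.reverse.takeWhile (· == ([] : List Char))).length with hk
  have hdecomp : t1 = core ++ List.replicate k [] := by
    conv_lhs => rw [← List.reverse_reverse t1,
      ← List.takeWhile_append_dropWhile (p := (· == ([] : List Char))) (l := t1.reverse)]
    rw [List.reverse_append]
    congr 1
    have : ∀ x ∈ (t1.reverse.takeWhile (· == ([] : List Char))).reverse, x = ([] : List Char) := by
      intro x hx
      have := List.mem_takeWhile_imp (List.mem_reverse.1 hx)
      simpa using this
    rw [List.eq_replicate_of_mem this]
    simp [hk]
  have hlastcore : ∀ h : core ≠ [], ¬ core.getLast h = [] := by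
    intro h h0
    have h1' : core.getLast? = some [] := (List.getLast_eq_iff_getLast?_eq_some h).1 h0
    rw [hcore, List.getLast?_reverse] at h1'
    have hd : t1.reverse.dropWhile (· == ([] : List Char)) ≠ [] := by
      intro h2'; rw [h2'] at h1'; simp at h1'
    have hp := List.head_dropWhile_not (p := (· == ([] : List Char))) (l := t1.reverse) hd
    rw [List.head_eq_iff_head?_eq_some hd |>.2 h1'] at hp
    simp at hp
  -- strip∘join ignores the trimmed edges
  have h5 : pvGC t1 = pvGC core ++ (if k = 0 then [] else [[]]) := by
    rw [hdecomp] at *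
    exact pvGC_appendBlanks core k hlastcore
  have h6 : PySem.Chars.strip (PySem.Chars.join ['\n'] (pvGC t1))
      = PySem.Chars.strip (PySem.Chars.join ['\n'] (pvGC core)) := by
    rw [h5]
    by_cases hk0 : k = 0
    · simp [hk0]
    · rw [if_neg hk0]
      exact pv_strip_join_append_nil _
  have h7 : PySem.Chars.strip (PySem.Chars.join ['\n'] (pvGC lines))
      = PySem.Chars.strip (PySem.Chars.join ['\n'] (pvGC t1)) := by
    rw [pvGC_dropFront lines]
    by_cases hh : lines.head? = some []
    · rw [if_pos hh, List.singleton_append, ← ht1]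
      exact pv_strip_join_cons_nil _
    · rw [if_neg hh, List.nil_append, ht1]
  rw [h6.symm, h7]

-- ===== VERDICT (by name: the statement is the Claim_ definition above) =====
theorem clean_code_for_display_spec : Claim_equal_clean_code_for_display := by
  unfold Claim_equal_clean_code_for_display
  intro s _
  unfold Spec_clean_code_for_display clean_code_for_display clean_code_for_display_alt
  by_cases hs : s = ""
  · rw [if_pos hs, if_pos hs]
  · rw [if_neg hs, if_neg hs]
    simp only [List.foldl_cons, List.foldl_nil]
    rw [pv_main _ (pvH_map_rstrip _)]
    exact pv_guard _
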